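-- pv_equiv track=rewrite | github.com/alekseivoroshilov/db-course-spydatabase-2021 | cursov_db/db_interface.py | format_agents
-- ===== SOURCE A (Python) =====
-- def format_agents(elements):
--     string = ""
--     i = 0
--     for elem in elements:
--         if i == 0:
--             string += "id: "
--             string += str(elem)
--             string += '\n'
--             i += 1
--             continue
--         elif i == 1:
--             string += "name: "
--             string += str(elem)
--             string += '\n'
--             i += 1
--             continue
--         elif i == 2:
--             string += "available: "
--             string += str(elem)
--             string += '\n'
--             i += 1
--             continue
--         elif i == 3:
--             string += "pack_id: "
--             string += str(elem)
--             string += '\n\n'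
--             i = 0
--             continue
--     return string
-- ===== SOURCE B (Python) =====
-- LABELS = ("id: ", "name: ", "available: ", "pack_id: ")
--
--
-- def format_agents(elements):
--     # Stage 1: walk the list in strides of 4, cutting out one record per step;
--     # Stage 2: format each record as one block by zipping it with the label
--     # tuple (zip truncates a partial final record), a full record ends with a
--     # blank line; Stage 3: concatenate the blocks.
--     blocks = []
--     i = 0
--     n = len(elements)
--     while i < n:
--         chunk = elements[i:i + 4]
--         block = "".join(lab + str(e) + "\n" for lab, e in zip(LABELS, chunk))
--         if len(chunk) == 4:
--             block += "\n"
--         blocks.append(block)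
--         i += 4
--     return "".join(blocks)
-- ===== Notes on version B (the rewrite author's own statement) =====
-- stated objective: alternative
-- what changed: Instead of A's element-by-element state machine (a counter cycled by an if/elif chain), B strides the list in records of 4 (elements[i:i+4], i += 4), formats each record as a block by zipping it with the label tuple (zip truncates a partial final record) with a blank line only after full records, and joins the blocks.
import Mathlib
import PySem

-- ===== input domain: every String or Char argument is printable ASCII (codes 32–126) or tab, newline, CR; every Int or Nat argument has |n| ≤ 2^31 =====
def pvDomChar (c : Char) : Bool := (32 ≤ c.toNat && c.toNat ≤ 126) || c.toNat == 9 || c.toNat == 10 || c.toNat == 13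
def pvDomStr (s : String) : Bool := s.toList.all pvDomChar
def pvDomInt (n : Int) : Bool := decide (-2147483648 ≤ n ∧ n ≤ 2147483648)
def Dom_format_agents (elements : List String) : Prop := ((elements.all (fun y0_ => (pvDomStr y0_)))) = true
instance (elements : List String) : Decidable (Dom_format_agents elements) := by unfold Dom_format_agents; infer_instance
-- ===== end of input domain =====

-- B replaces A's per-element counter state machine with a staged chunking pass:
-- stride the list in records of 4, format each record by zipping with the label
-- tuple, concatenate the blocks (alternative decomposition, same cost).


-- ===== PORT A =====
def pvStepA (st : String × Int) (elem : String) : String × Int :=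
  if st.2 = 0 then (st.1 ++ "id: " ++ elem ++ "\n", st.2 + 1)
  else if st.2 = 1 then (st.1 ++ "name: " ++ elem ++ "\n", st.2 + 1)
  else if st.2 = 2 then (st.1 ++ "available: " ++ elem ++ "\n", st.2 + 1)
  else if st.2 = 3 then (st.1 ++ "pack_id: " ++ elem ++ "\n\n", 0)
  else st

def format_agents (elements : List String) : String :=
  (elements.foldl pvStepA ("", 0)).1

-- ===== PORT B =====
def pvLabelsB : List String := ["id: ", "name: ", "available: ", "pack_id: "]

-- one record's block: zip with the labels (zip truncates a partial final
-- record), blank line after a full record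
def pvBlockB (chunk : List String) : String :=
  let core := PySem.Str.join "" ((pvLabelsB.zip chunk).map (fun p => p.1 ++ p.2 ++ "\n"))
  if chunk.length = 4 then core ++ "\n" else core

-- the while loop: cut out elements[i:i+4], emit its block, i += 4
def pvBlocksB (elements : List String) (i : Nat) : List String :=
  if i < elements.length then
    pvBlockB (PySem.List.slice elements (some (i : Int)) (some ((i : Int) + 4)))
      :: pvBlocksB elements (i + 4)
  else []
termination_by elements.length - i

def format_agents_alt (elements : List String) : String :=
  PySem.Str.join "" (pvBlocksB elements 0)

-- ===== PRECONDITION & SPEC =====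
def Spec_format_agents (elements : List String) (out : String) : Prop := out = format_agents_alt elements
instance (elements : List String) (out : String) : Decidable (Spec_format_agents elements out) := by unfold Spec_format_agents; infer_instance

-- ===== CLAIM (what is proved, stated in full; the proofs are below) =====
def Claim_equal_format_agents : Prop := ∀ (elements : List String), Dom_format_agents elements → Spec_format_agents elements (format_agents elements)

-- ===== LEMMAS AND PROOFS =====

-- drop-based view of the block list (proof helper only)
def pvChunks : List String → List String
  | [] => []
  | x :: xs => pvBlockB ((x :: xs).take 4) :: pvChunks ((x :: xs).drop 4)
termination_by l => l.length

lemma pv_blocks_eq_chunks : ∀ (fuel : Nat) (l : List String) (i : Nat),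
    l.length ≤ i + fuel → pvBlocksB l i = pvChunks (l.drop i) := by
  intro fuel
  induction fuel with
  | zero =>
    intro l i h
    rw [pvBlocksB]
    have hge : ¬ i < l.length := by omega
    have hnil : l.drop i = [] := List.drop_eq_nil_of_le (by omega)
    simp [hge, hnil, pvChunks]
  | succ fuel ih =>
    intro l i h
    rw [pvBlocksB]
    by_cases hi : i < l.length
    · have hslice : PySem.List.slice l (some (i : Int)) (some ((i : Int) + 4))
          = (l.drop i).take 4 := by
        have := PySem.List.slice_natCast_add l i 4
        simpa using this
      cases hd : l.drop i with
      | nil => exact absurd hd (by simp; omega)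
      | cons x xs =>
        rw [if_pos hi, hslice, hd, pvChunks, ih l (i + 4) (by omega)]
        have h2 : List.drop (i + 4) l = List.drop 4 (x :: xs) := by
          rw [← hd, List.drop_drop]
        rw [h2]
    · have : l.drop i = [] := List.drop_eq_nil_of_le (by omega)
      simp [hi, this, pvChunks]

lemma pv_intercalate_nil (l : List (List Char)) : ([] : List Char).intercalate l = l.flatten := by
  induction l with
  | nil => simp [List.intercalate]
  | cons x t ih =>
    cases t with
    | nil => simp [List.intercalate]
    | cons y u => simp_all [List.intercalate, List.intersperse]

lemma pv_join_cons (x : String) (l : List String) :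
    PySem.Str.join "" (x :: l) = x ++ PySem.Str.join "" l := by
  apply String.toList_inj.mp
  simp [PySem.Str.toList_join, PySem.Chars.join, pv_intercalate_nil]

lemma pv_join_nil : PySem.Str.join "" ([] : List String) = "" := rfl

lemma pv_m1 (x : String) : "\n" ++ ("name: " ++ x) = "\nname: " ++ x := by
  rw [← String.append_assoc]; congr 1
lemma pv_m2 (x : String) : "\n" ++ ("available: " ++ x) = "\navailable: " ++ x := by
  rw [← String.append_assoc]; congr 1
lemma pv_m3 (x : String) : "\n" ++ ("pack_id: " ++ x) = "\npack_id: " ++ x := by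
  rw [← String.append_assoc]; congr 1

lemma pv_key : ∀ (n : Nat) (l : List String), l.length ≤ n → ∀ s : String,
    (l.foldl pvStepA (s, 0)).1 = s ++ PySem.Str.join "" (pvChunks l) := by
  intro n
  induction n with
  | zero =>
    intro l hl s
    cases l with
    | nil => simp [pvChunks, pv_join_nil]
    | cons a t => simp at hl
  | succ n ih =>
    intro l hl s
    match l with
    | [] => simp [pvChunks, pv_join_nil]
    | [a] =>
      simp [pvChunks, pvBlockB, pvLabelsB, pv_join_cons, pv_join_nil,
        pvStepA, String.append_assoc]
    | [a, b] =>
      simp [pvChunks, pvBlockB, pvLabelsB, pv_join_cons, pv_join_nil,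
        pvStepA, String.append_assoc, pv_m1]
    | [a, b, c] =>
      simp [pvChunks, pvBlockB, pvLabelsB, pv_join_cons, pv_join_nil,
        pvStepA, String.append_assoc, pv_m1, pv_m2]
    | a :: b :: c :: d :: t =>
      have ht : t.length ≤ n := by simp at hl; omega
      have hfold :
          ((a :: b :: c :: d :: t).foldl pvStepA (s, 0)).1
            = (t.foldl pvStepA
                (s ++ "id: " ++ a ++ "\n" ++ "name: " ++ b ++ "\n" ++ "available: " ++ c
                   ++ "\n" ++ "pack_id: " ++ d ++ "\n\n", 0)).1 := by
        simp [pvStepA]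
      rw [hfold, ih t ht]
      show _ = s ++ PySem.Str.join "" (pvChunks (a :: b :: c :: d :: t))
      rw [pvChunks]
      simp [pvBlockB, pvLabelsB, pv_join_cons, pv_join_nil, String.append_assoc,
        pv_m1, pv_m2, pv_m3]

-- ===== VERDICT (by name: the statement is the Claim_ definition above) =====
theorem format_agents_spec : Claim_equal_format_agents := by
  intro elements _
  unfold Spec_format_agents format_agents format_agents_alt
  rw [pv_blocks_eq_chunks elements.length elements 0 (by omega)]
  simpa using pv_key elements.length elements le_rfl ""
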